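-- pv_equiv track=rewrite | github.com/AdamZhouSE/pythonHomework | Code/CodeRecords/2115/60889/301087.py | delect
-- ===== SOURCE A (Python) =====
-- def delect(roads):
--     length = len(roads)
--     lastLength = len(roads)+1
--     while length != lastLength:
--         i = 0
--         lastLength = length
--         while i < len(roads):
--             count = 0
--             for j in roads[i]:
--                 if j == 1:
--                     count = count + 1
--             if count <= 1:
--                 length = length - 1
--                 del roads[i]
--                 for j in roads:
--                     del j[i]
--                 i = i - 1
--             i = i + 1
--     return roads
-- ===== SOURCE B (Python) =====
-- def delect(roads):
--     # 2-core peeling on a square 0/1 matrix: keep an alive mask and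
--     # incrementally maintained per-row counts of ones instead of physically
--     # deleting rows/columns and recounting each pass; build the result once.
--     n = len(roads)
--     cnt = [row.count(1) for row in roads]
--     alive = [True] * n
--     changed = True
--     while changed:
--         changed = False
--         for k in range(n):
--             if alive[k] and cnt[k] <= 1:
--                 alive[k] = False
--                 changed = True
--                 for j in range(n):
--                     if alive[j] and roads[j][k] == 1:
--                         cnt[j] -= 1
--     res = [[v for a, v in zip(alive, row) if a]
--            for keep, row in zip(alive, roads) if keep]
--     roads[:] = res
--     return roads
-- ===== Notes on version B (the rewrite author's own statement) =====
-- stated objective: alternative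
-- what changed: B never copies or physically deletes rows/columns: it keeps an alive mask with incrementally maintained per-row counts of ones, decrementing them as columns die, and builds the result matrix once at the end; Pre_ restricts to square matrices (the function's 2-core purpose), since on ragged inputs A's column deletion can raise IndexError or accidentally keep trailing columns beyond the row count.
-- outside the precondition, e.g. on delect([[1, 1, 0], [1, 1, 0]]): A returns [[1, 1, 0], [1, 1, 0]], B returns [[1, 1], [1, 1]]
import Mathlib
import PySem

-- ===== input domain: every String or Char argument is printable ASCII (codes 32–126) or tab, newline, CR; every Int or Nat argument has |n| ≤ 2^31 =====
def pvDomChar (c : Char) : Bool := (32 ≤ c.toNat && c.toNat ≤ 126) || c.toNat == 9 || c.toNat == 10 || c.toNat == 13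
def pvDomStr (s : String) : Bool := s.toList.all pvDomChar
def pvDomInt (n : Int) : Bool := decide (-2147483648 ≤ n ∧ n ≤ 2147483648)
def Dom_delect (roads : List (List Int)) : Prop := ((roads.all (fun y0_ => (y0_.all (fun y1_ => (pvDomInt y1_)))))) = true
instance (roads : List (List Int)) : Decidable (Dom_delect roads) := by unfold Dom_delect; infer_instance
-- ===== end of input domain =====

-- B replaces A's repeated physical row/column deletion and per-pass recounting by an
-- alive mask with incrementally maintained per-row one-counts; the return value is the
-- same on square matrices (like A, B also stores the result into the argument list in place).

-- ===== PORT A =====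
-- count = 0; for j in roads[i]: if j == 1: count += 1
def cntA (r : List Int) : Int := r.foldl (fun count j => if j == 1 then count + 1 else count) 0

-- termination facts cited by name from the `decreasing_by` blocks
theorem dec_nat (a b : Nat) (h : b < a) : a - (b + 1) < a - b := by omega

theorem dec_erase (roads : List (List Int)) (i : Nat) (h : i < roads.length) :
    ((roads.eraseIdx i).map (fun j => j.eraseIdx i)).length - i < roads.length - i := by
  simp only [List.length_map, List.length_eraseIdx, if_pos h]; omega

-- the inner `while i < len(roads)` pass of A (del roads[i]; del j[i] for every row j)
def passA (roads : List (List Int)) (i : Nat) : List (List Int) :=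
  if h : i < roads.length then
    if cntA (roads.getD i []) ≤ 1 then
      passA ((roads.eraseIdx i).map (fun j => j.eraseIdx i)) i
    else
      passA roads (i + 1)
  else roads
termination_by roads.length - i
decreasing_by
  · exact dec_erase roads i h
  · exact dec_nat roads.length i h

-- the outer `while length != lastLength` loop of A; the fuel argument (strictly more
-- than the possible number of iterations) only makes the recursion structural
def loopA : Nat → List (List Int) → List (List Int)
  | 0, roads => roads
  | fuel + 1, roads =>
      let r' := passA roads 0
      if r'.length = roads.length then r' else loopA fuel r'

def delect (roads : List (List Int)) : List (List Int) := loopA (roads.length + 1) roads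

-- ===== PORT B =====
-- cnt[k] = row.count(1)
def cntB (r : List Int) : Int := (r.count 1 : Int)

-- for j in range(n): if alive[j] and roads[j][k] == 1: cnt[j] -= 1
def dec1 (roads : List (List Int)) (alive : List Bool) (k : Nat) (cnt : List Int) : List Int :=
  cnt.mapIdx (fun j c =>
    if alive.getD j false && ((roads.getD j []).getD k 0 == 1) then c - 1 else c)

-- the `for k in range(n)` pass of B
def passB (roads : List (List Int)) (k : Nat) (alive : List Bool) (cnt : List Int)
    (changed : Bool) : List Bool × List Int × Bool :=
  if h : k < roads.length then
    if alive.getD k false && decide (cnt.getD k 0 ≤ 1) then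
      passB roads (k + 1) (alive.set k false) (dec1 roads (alive.set k false) k cnt) true
    else
      passB roads (k + 1) alive cnt changed
  else (alive, cnt, changed)
termination_by roads.length - k
decreasing_by
  · exact dec_nat roads.length k h
  · exact dec_nat roads.length k h

-- the `while changed` loop of B; fuel as in loopA
def loopB (roads : List (List Int)) : Nat → List Bool → List Int → List Bool
  | 0, alive, _ => alive
  | fuel + 1, alive, cnt =>
      let r := passB roads 0 alive cnt false
      if r.2.2 then loopB roads fuel r.1 r.2.1 else r.1

-- [[v for a, v in zip(alive, row) if a] for keep, row in zip(alive, roads) if keep]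
def delect_alt (roads : List (List Int)) : List (List Int) :=
  let n := roads.length
  let cnt := roads.map cntB
  let alive := List.replicate n true
  let af := loopB roads (n + 1) alive cnt
  ((af.zip roads).filter (fun p => p.1)).map (fun p =>
    ((af.zip p.2).filter (fun q => q.1)).map (fun q => q.2))

-- ===== PRECONDITION & SPEC =====
-- Pre_ restricts to square matrices, the function's natural 2-core domain: on ragged
-- inputs A's column deletion `del j[i]` can raise IndexError, and where it does return
-- the surviving trailing columns (beyond the row count) are an accident of A's physical
-- deletion that a mask-based rewrite has no reason to reproduce.
def Pre_delect (roads : List (List Int)) : Prop := ∀ r ∈ roads, r.length = roads.length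
instance (roads : List (List Int)) : Decidable (Pre_delect roads) := by
  unfold Pre_delect; infer_instance

def pvWitness_delect : List (List Int) := [[1, 1, 1], [1, 1, 0], [1, 0, 1]]

def Spec_delect (roads : List (List Int)) (out : List (List Int)) : Prop := out = delect_alt roads
instance (roads : List (List Int)) (out : List (List Int)) : Decidable (Spec_delect roads out) := by unfold Spec_delect; infer_instance

-- ===== CLAIM (what is proved, stated in full; the proofs are below) =====
def Claim_equal_delect : Prop := ∀ (roads : List (List Int)), Dom_delect roads → Pre_delect roads → Spec_delect roads (delect roads)

-- ===== LEMMAS AND PROOFS =====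

-- abstraction: the physical matrix determined by the original input and an alive mask
def rmask (alive : List Bool) (p : Nat) : Bool := alive.getD p false

def restr (alive : List Bool) (r : List Int) : List Int :=
  ((List.range r.length).filter (rmask alive)).map (fun p => r.getD p 0)

def absM (R : List (List Int)) (alive : List Bool) : List (List Int) :=
  ((List.range R.length).filter (fun k => alive.getD k false)).map
    (fun k => restr alive (R.getD k []))

-- cb alive k = physical index of original row k = number of alive indices below k
def cb (alive : List Bool) (k : Nat) : Nat :=
  ((List.range k).filter (fun p => alive.getD p false)).length

-- B's loop invariant: cnt holds the one-counts of the surviving submatrix rows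
def InvR (R : List (List Int)) (alive : List Bool) (cnt : List Int) : Prop :=
  alive.length = R.length ∧ cnt.length = R.length ∧
    ∀ k, k < R.length → alive.getD k false = true →
      cnt.getD k 0 = cntA (restr alive (R.getD k []))

theorem eraseIdx_append_mid {α : Type} (A B : List α) (k : α) :
    (A ++ k :: B).eraseIdx A.length = A ++ B := by
  induction A with
  | nil => rfl
  | cons a t ih => simp [ih]

theorem getD_append_mid {α : Type} [Inhabited α] (A B : List α) (v d : α) :
    (A ++ v :: B).getD A.length d = v := by
  simp [List.getD_eq_getElem?_getD]

theorem filter_range_decomp (p : Nat → Bool) (m k : Nat) (hk : k < m) (hpk : p k = true) :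
    (List.range m).filter p =
      (List.range k).filter p ++ k ::
        (((List.range (m - (k + 1))).map (fun i => k + 1 + i)).filter p) := by
  have hm : m = k + 1 + (m - (k + 1)) := by omega
  rw [hm, List.range_add, List.filter_append,
    show List.range (k + 1) = List.range k ++ [k] from List.range_succ, List.filter_append]
  simp [hpk]

theorem erase_filter (p q : Nat → Bool) (m k : Nat) (hk : k < m) (hpk : p k = true)
    (hqk : q k = false) (hag : ∀ x, x ≠ k → q x = p x) :
    (List.range m).filter q =
      ((List.range m).filter p).eraseIdx (((List.range k).filter p).length) := by
  rw [filter_range_decomp p m k hk hpk, eraseIdx_append_mid]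
  have h1 : (List.range k).filter q = (List.range k).filter p :=
    List.filter_congr (fun x hx => hag x (by simp at hx; omega))
  have h2 : ((List.range (m - (k + 1))).map (fun i => k + 1 + i)).filter q
      = ((List.range (m - (k + 1))).map (fun i => k + 1 + i)).filter p :=
    List.filter_congr (fun x hx => by
      simp at hx; obtain ⟨i, _, rfl⟩ := hx; exact hag _ (by omega))
  calc (List.range m).filter q
      = ((List.range k).filter q) ++
          ((List.range (m - (k + 1))).map (fun i => k + 1 + i)).filter q := by
        conv_lhs => rw [show m = k + 1 + (m - (k + 1)) by omega, List.range_add,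
          List.filter_append,
          show List.range (k + 1) = List.range k ++ [k] from List.range_succ,
          List.filter_append]
        simp [hqk]
    _ = _ := by rw [h1, h2]

theorem filt_length_mono {α : Type} (l : List α) (p q : α → Bool)
    (h : ∀ x ∈ l, p x = true → q x = true) :
    (l.filter p).length ≤ (l.filter q).length := by
  induction l with
  | nil => simp
  | cons a t ih =>
      have ih' := ih (fun x hx => h x (List.mem_cons_of_mem a hx))
      by_cases hp : p a = true
      · simp [hp, h a (List.mem_cons_self) hp]; omega
      · simp only [List.filter_cons]
        rw [show p a = false by simpa using hp]
        cases hq : q a <;> simp <;> omega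

theorem getD_set_self_false (l : List Bool) (k : Nat) :
    (l.set k false).getD k false = false := by
  by_cases h : k < l.length
  · simp [List.getD_eq_getElem?_getD, h]
  · rw [List.set_eq_of_length_le (by omega)]
    simp [List.getD_eq_getElem?_getD, List.getElem?_eq_none (le_of_not_gt h)]

theorem getD_set_ne' (l : List Bool) (k x : Nat) (h : x ≠ k) (d : Bool) :
    (l.set k false).getD x d = l.getD x d := by
  simp [List.getD_eq_getElem?_getD, List.getElem?_set_ne (Ne.symm h)]

-- cntA as a countP
theorem cntA_foldl_general (l : List Int) :
    ∀ c : Int, l.foldl (fun count j => if j == 1 then count + 1 else count) c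
      = c + (l.countP (fun v => v == 1) : Int) := by
  induction l with
  | nil => simp
  | cons a t ih =>
      intro c
      by_cases h : (a == 1) = true
      · rw [List.foldl_cons, if_pos h, ih, List.countP_cons, if_pos h]; push_cast; ring
      · rw [List.foldl_cons, if_neg h, ih, List.countP_cons, if_neg h]; push_cast; ring

theorem cntA_eq (l : List Int) : cntA l = (l.countP (fun v => v == 1) : Int) := by
  unfold cntA; rw [cntA_foldl_general l 0]; ring

theorem cntB_eq (l : List Int) : cntB l = cntA l := by
  rw [cntA_eq]; unfold cntB
  norm_cast

theorem cntA_eraseIdx (l : List Int) (i : Nat) (hi : i < l.length) :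
    cntA (l.eraseIdx i) = cntA l - (if l.getD i 0 == 1 then 1 else 0) := by
  have hgetD : l.getD i 0 = l[i] := by
    rw [List.getD_eq_getElem?_getD, List.getElem?_eq_getElem hi]; rfl
  have hdrop : l.drop i = l.getD i 0 :: l.drop (i + 1) := by
    rw [hgetD]; exact List.drop_eq_getElem_cons hi
  have hsplit : l.countP (fun v => v == 1)
      = (l.take i).countP (fun v => v == 1)
        + ((l.getD i 0 :: l.drop (i + 1)).countP (fun v => v == 1)) := by
    conv_lhs => rw [← List.take_append_drop i l]
    rw [List.countP_append, hdrop]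
  rw [List.eraseIdx_eq_take_drop_succ, cntA_eq, cntA_eq, List.countP_append]
  by_cases hc : ((l.getD i 0) == 1) = true
  · rw [hsplit, List.countP_cons, if_pos hc, if_pos hc]; push_cast; ring
  · rw [hsplit, List.countP_cons, if_neg hc, if_neg hc]; push_cast; ring

-- cb facts
theorem cb_succ (alive : List Bool) (k : Nat) :
    cb alive (k + 1) = cb alive k + (if alive.getD k false then 1 else 0) := by
  unfold cb
  rw [List.range_succ, List.filter_append, List.length_append, List.filter_cons,
    List.filter_nil]
  cases h : alive.getD k false <;> simp

theorem cb_lt_of_true (alive : List Bool) (k n : Nat) (hk : k < n)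
    (ha : alive.getD k false = true) : cb alive k < cb alive n := by
  unfold cb
  rw [filter_range_decomp (fun p => alive.getD p false) n k hk ha]
  simp [List.length_append]

theorem cb_set_of_le (alive : List Bool) (k j : Nat) (hj : j ≤ k) :
    cb (alive.set k false) j = cb alive j := by
  unfold cb
  congr 1
  exact List.filter_congr (fun x hx => by
    simp at hx; exact getD_set_ne' alive k x (by omega) false)

theorem cb_le_of_imp (a b : List Bool)
    (h : ∀ p, a.getD p false = true → b.getD p false = true) (j : Nat) :
    cb a j ≤ cb b j :=
  filt_length_mono _ _ _ (fun x _ hx => h x hx)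

theorem cb_set_lt (alive : List Bool) (k n : Nat) (hk : k < n)
    (ha : alive.getD k false = true) : cb (alive.set k false) n < cb alive n := by
  unfold cb
  rw [erase_filter (fun p => alive.getD p false) (fun p => (alive.set k false).getD p false)
    n k hk ha (getD_set_self_false alive k) (fun x hx => getD_set_ne' alive k x hx false)]
  rw [List.length_eraseIdx]
  have h1 := cb_lt_of_true alive k n hk ha
  unfold cb at h1
  simp only [if_pos h1]
  omega

-- restr facts
theorem rmask_eq (alive : List Bool) (k : Nat) : rmask alive k = alive.getD k false := rfl

theorem cb_eq_rmask (alive : List Bool) (k : Nat) :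
    ((List.range k).filter (rmask alive)).length = cb alive k := rfl

theorem restr_kill (alive : List Bool) (r : List Int) (k : Nat)
    (hk : k < r.length) (ha : alive.getD k false = true) :
    restr (alive.set k false) r = (restr alive r).eraseIdx (cb alive k) := by
  unfold restr
  rw [erase_filter (rmask alive) (rmask (alive.set k false)) r.length k
    hk (by rw [rmask_eq]; exact ha)
    (by rw [rmask_eq]; exact getD_set_self_false alive k)
    (fun x hx => by rw [rmask_eq, rmask_eq]; exact getD_set_ne' alive k x hx false)]
  rw [cb_eq_rmask, ← List.eraseIdx_map]

theorem restr_cb_lt (alive : List Bool) (r : List Int) (k : Nat)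
    (hk : k < r.length) (ha : alive.getD k false = true) :
    cb alive k < (restr alive r).length := by
  unfold restr
  rw [filter_range_decomp (rmask alive) r.length k hk (by rw [rmask_eq]; exact ha)]
  rw [List.map_append, List.length_append, List.length_map, cb_eq_rmask]
  simp

theorem restr_getD (alive : List Bool) (r : List Int) (k : Nat)
    (hk : k < r.length) (ha : alive.getD k false = true) :
    (restr alive r).getD (cb alive k) 0 = r.getD k 0 := by
  unfold restr
  rw [filter_range_decomp (rmask alive) r.length k hk (by rw [rmask_eq]; exact ha)]
  rw [List.map_append, List.map_cons]
  rw [show cb alive k = (((List.range k).filter (rmask alive)).map (fun p => r.getD p 0)).length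
    by rw [List.length_map, cb_eq_rmask]]
  exact getD_append_mid _ _ _ _

-- absM facts
theorem getD_mem_of_lt {α : Type} (l : List α) (j : Nat) (d : α) (h : j < l.length) :
    l.getD j d ∈ l := by
  rw [List.getD_eq_getElem?_getD, List.getElem?_eq_getElem h]
  exact List.getElem_mem h

theorem absM_length (R : List (List Int)) (alive : List Bool) :
    (absM R alive).length = cb alive R.length := by
  simp [absM, cb]

theorem absM_getD (R : List (List Int)) (alive : List Bool) (k : Nat)
    (hk : k < R.length) (ha : alive.getD k false = true) :
    (absM R alive).getD (cb alive k) [] = restr alive (R.getD k []) := by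
  unfold absM
  rw [filter_range_decomp (fun p => alive.getD p false) R.length k hk ha]
  rw [List.map_append, List.map_cons]
  rw [show cb alive k = (((List.range k).filter (fun p => alive.getD p false)).map
      (fun j => restr alive (R.getD j []))).length
    by rw [List.length_map]; rfl]
  exact getD_append_mid _ _ _ _

theorem abs_kill (R : List (List Int)) (alive : List Bool) (k : Nat)
    (HP : ∀ r ∈ R, R.length ≤ r.length) (hk : k < R.length)
    (ha : alive.getD k false = true) :
    absM R (alive.set k false) =
      ((absM R alive).eraseIdx (cb alive k)).map (fun r => r.eraseIdx (cb alive k)) := by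
  unfold absM
  rw [erase_filter (fun p => alive.getD p false) (fun p => (alive.set k false).getD p false)
    R.length k hk ha (getD_set_self_false alive k) (fun x hx => getD_set_ne' alive k x hx false)]
  rw [← List.eraseIdx_map]
  conv_rhs => rw [← List.eraseIdx_map, List.map_map]
  congr 1
  apply List.map_congr_left
  intro j hj
  simp only [List.mem_filter, List.mem_range] at hj
  exact restr_kill alive (R.getD j []) k
    (lt_of_lt_of_le hk (HP _ (getD_mem_of_lt R j [] hj.1))) ha

-- invariant preservation under killing column/row k
theorem inv_kill (R : List (List Int)) (alive : List Bool) (cnt : List Int) (k : Nat)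
    (HP : ∀ r ∈ R, R.length ≤ r.length) (hI : InvR R alive cnt)
    (hk : k < R.length) (ha : alive.getD k false = true) :
    InvR R (alive.set k false) (dec1 R (alive.set k false) k cnt) := by
  obtain ⟨hal, hcl, hc⟩ := hI
  refine ⟨by simp [hal], by simp [dec1, hcl], ?_⟩
  intro j hj haj'
  have hjk : j ≠ k := by
    intro hjeq; subst hjeq
    rw [getD_set_self_false] at haj'; exact absurd haj' (by simp)
  have haj : alive.getD j false = true := by
    rw [getD_set_ne' alive k j hjk false] at haj'; exact haj'
  have hjlen : R.length ≤ (R.getD j []).length := HP _ (getD_mem_of_lt R j [] hj)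
  have hj' : j < cnt.length := by omega
  have hd : (dec1 R (alive.set k false) k cnt).getD j 0 =
      if (R.getD j []).getD k 0 == 1 then cnt.getD j 0 - 1 else cnt.getD j 0 := by
    have haj'' : (alive.set k false)[j]?.getD false = true := by
      rw [← List.getD_eq_getElem?_getD]; exact haj'
    simp [dec1, List.getD_eq_getElem?_getD, List.getElem?_mapIdx,
      List.getElem?_eq_getElem hj', haj'']
  rw [hd, restr_kill alive (R.getD j []) k (lt_of_lt_of_le hk hjlen) ha,
    cntA_eraseIdx _ _ (restr_cb_lt alive (R.getD j []) k (lt_of_lt_of_le hk hjlen) ha),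
    restr_getD alive (R.getD j []) k (lt_of_lt_of_le hk hjlen) ha, hc j hj haj]
  split_ifs <;> ring

-- the central simulation: from position k of a pass, A's physical pass computes the
-- abstraction of B's final mask, and the invariant survives
theorem pass_sim (R : List (List Int)) (HP : ∀ r ∈ R, R.length ≤ r.length)
    (k : Nat) (alive : List Bool) (cnt : List Int) (ch : Bool) :
    InvR R alive cnt →
      (passA (absM R alive) (cb alive k) = absM R (passB R k alive cnt ch).1
       ∧ InvR R (passB R k alive cnt ch).1 (passB R k alive cnt ch).2.1
       ∧ ((passB R k alive cnt ch).2.2 = false →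
            (passB R k alive cnt ch).1 = alive ∧ (passB R k alive cnt ch).2.1 = cnt ∧ ch = false)
       ∧ (∀ p, (passB R k alive cnt ch).1.getD p false = true → alive.getD p false = true)
       ∧ (ch = false → (passB R k alive cnt ch).2.2 = true →
            cb (passB R k alive cnt ch).1 R.length < cb alive R.length)) := by
  fun_induction passB R k alive cnt ch with
  | case1 k alive cnt ch h hif ih =>
      intro hI
      have hcond := hif
      simp only [Bool.and_eq_true, decide_eq_true_eq] at hcond
      have ha : alive.getD k false = true := hcond.1
      have hcnt : cnt.getD k 0 ≤ 1 := hcond.2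
      have hI' := inv_kill R alive cnt k HP hI h ha
      have IH := ih hI'
      have h1 : cb alive k < (absM R alive).length := by
        rw [absM_length]; exact cb_lt_of_true alive k R.length h ha
      have h2 : cntA ((absM R alive).getD (cb alive k) []) ≤ 1 := by
        rw [absM_getD R alive k h ha, ← hI.2.2 k h ha]; exact hcnt
      refine ⟨?_, IH.2.1, ?_, ?_, ?_⟩
      · have hA : passA (absM R alive) (cb alive k)
            = passA (((absM R alive).eraseIdx (cb alive k)).map
                (fun j => j.eraseIdx (cb alive k))) (cb alive k) := by
          rw [passA]; rw [dif_pos h1, if_pos h2]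
        rw [hA, ← abs_kill R alive k HP h ha]
        have hidx : cb alive k = cb (alive.set k false) (k + 1) := by
          rw [cb_succ, getD_set_self_false, cb_set_of_le alive k k le_rfl]; simp
        rw [hidx]
        exact IH.1
      · intro hf
        rcases IH.2.2.1 hf with ⟨-, -, hcc⟩
        exact absurd hcc (by simp)
      · intro p hp
        have hp' := IH.2.2.2.1 p hp
        by_cases hpk : p = k
        · subst hpk; rw [getD_set_self_false] at hp'; exact absurd hp' (by simp)
        · rw [getD_set_ne' alive k p hpk false] at hp'; exact hp'
      · intro _ _
        have hle : cb (passB R (k + 1) (alive.set k false)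
            (dec1 R (alive.set k false) k cnt) true).1 R.length
            ≤ cb (alive.set k false) R.length :=
          cb_le_of_imp _ _ IH.2.2.2.1 R.length
        have hlt := cb_set_lt alive k R.length h ha
        omega
  | case2 k alive cnt ch h hif ih =>
      intro hI
      have IH := ih hI
      refine ⟨?_, IH.2.1, IH.2.2.1, IH.2.2.2.1, IH.2.2.2.2⟩
      by_cases hka : alive.getD k false = true
      · have hcnt : ¬ (cnt.getD k 0 ≤ 1) := fun hle => hif (by rw [hka, Bool.true_and, decide_eq_true hle])
        have h1 : cb alive k < (absM R alive).length := by
          rw [absM_length]; exact cb_lt_of_true alive k R.length h hka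
        have h2 : ¬ (cntA ((absM R alive).getD (cb alive k) []) ≤ 1) := by
          rw [absM_getD R alive k h hka, ← hI.2.2 k h hka]; exact hcnt
        have hA : passA (absM R alive) (cb alive k)
            = passA (absM R alive) (cb alive k + 1) := by
          rw [passA]; rw [dif_pos h1, if_neg h2]
        rw [hA, show cb alive k + 1 = cb alive (k + 1) by rw [cb_succ, hka]; simp]
        exact IH.1
      · rw [show cb alive k = cb alive (k + 1)
          by rw [cb_succ, show alive.getD k false = false by simpa using hka]; simp]
        exact IH.1
  | case3 k alive cnt ch h =>
      intro hI
      have hkn : ¬ (cb alive k < (absM R alive).length) := by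
        rw [absM_length]
        have hmono : cb alive R.length ≤ cb alive k := by
          unfold cb
          rw [show k = R.length + (k - R.length) by omega, List.range_add,
            List.filter_append, List.length_append]
          omega
        omega
      refine ⟨?_, hI, fun hf => ⟨rfl, rfl, hf⟩, fun p hp => hp, ?_⟩
      · rw [passA, dif_neg hkn]
      · intro h1 h2; rw [h1] at h2; exact absurd h2 (by simp)

-- the outer loops agree (run with the same fuel, they proceed in lockstep)
theorem loop_sim (R : List (List Int)) (HP : ∀ r ∈ R, R.length ≤ r.length) :
    ∀ (fuel : Nat) (alive : List Bool) (cnt : List Int), InvR R alive cnt →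
      cb alive R.length < fuel →
      loopA fuel (absM R alive) = absM R (loopB R fuel alive cnt) := by
  intro fuel
  induction fuel with
  | zero => intro alive cnt _ hm; omega
  | succ fuel ih =>
      intro alive cnt hI hm
      have PS := pass_sim R HP 0 alive cnt false hI
      have hA0 : passA (absM R alive) 0 = absM R (passB R 0 alive cnt false).1 := by
        have := PS.1; rwa [show cb alive 0 = 0 from rfl] at this
      rw [loopA, loopB]
      cases hch : (passB R 0 alive cnt false).2.2 with
      | false =>
          obtain ⟨he1, -, -⟩ := PS.2.2.1 hch
          simp only [if_neg (by simp : ¬ (false = true))]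
          rw [if_pos (by rw [hA0, he1]), hA0, he1]
      | true =>
          have hlt := PS.2.2.2.2 rfl hch
          have hne : ¬ ((passA (absM R alive) 0).length = (absM R alive).length) := by
            rw [hA0, absM_length, absM_length]; omega
          simp only []
          rw [if_neg hne, hA0]
          exact ih (passB R 0 alive cnt false).1 (passB R 0 alive cnt false).2.1
            PS.2.1 (by omega)

-- alive-length preservation through B's loops
theorem passB_length (R : List (List Int)) (k : Nat) (alive : List Bool) (cnt : List Int)
    (ch : Bool) : (passB R k alive cnt ch).1.length = alive.length := by
  fun_induction passB R k alive cnt ch with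
  | case1 k alive cnt ch h hif ih => rw [ih]; simp
  | case2 k alive cnt ch h hif ih => exact ih
  | case3 k alive cnt ch h => rfl

theorem loopB_length (R : List (List Int)) :
    ∀ (fuel : Nat) (alive : List Bool) (cnt : List Int),
      (loopB R fuel alive cnt).length = alive.length := by
  intro fuel
  induction fuel with
  | zero => intro alive cnt; rfl
  | succ fuel ih =>
      intro alive cnt
      rw [loopB]
      split
      · rw [ih]; exact passB_length R 0 alive cnt false
      · exact passB_length R 0 alive cnt false

-- the zip/filter comprehension equals the range/filter selection
theorem zsel_eq {α : Type} (d : α) :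
    ∀ (alive : List Bool) (r : List α), alive.length = r.length →
    ((alive.zip r).filter (fun p => p.1)).map (fun p => p.2)
      = ((List.range r.length).filter (fun p => alive.getD p false)).map
          (fun p => r.getD p d) := by
  intro alive
  induction alive with
  | nil =>
      intro r h
      rw [List.eq_nil_of_length_eq_zero h.symm]; rfl
  | cons a as ih =>
      intro r h
      cases r with
      | nil => simp at h
      | cons x rs =>
          have h' : as.length = rs.length := by simpa using h
          have hmap : ((List.range rs.length).map Nat.succ).filter
              (fun p => (a :: as).getD p false)
              = ((List.range rs.length).filter (fun p => as.getD p false)).map Nat.succ := by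
            rw [List.filter_map]
            congr 1
          have htail : ((List.range rs.length).filter (fun p => as.getD p false)).map
                ((fun p => (x :: rs).getD p d) ∘ Nat.succ)
              = ((List.range rs.length).filter (fun p => as.getD p false)).map
                (fun p => rs.getD p d) :=
            List.map_congr_left (fun i _ => by simp)
          rw [List.zip_cons_cons, List.length_cons, List.range_succ_eq_map]
          cases a with
          | true =>
              rw [List.filter_cons_of_pos (by simp), List.filter_cons_of_pos (by simp),
                List.map_cons, List.map_cons, hmap, List.map_map, htail, ih rs h']
              rfl
          | false =>
              rw [List.filter_cons_of_neg (by simp), List.filter_cons_of_neg (by simp),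
                hmap, List.map_map, htail, ih rs h']

-- initial state
theorem map_getD_range {α : Type} [Inhabited α] (l : List α) (d : α) :
    (List.range l.length).map (fun p => l.getD p d) = l := by
  apply List.ext_getElem
  · simp
  · intro i h1 h2
    simp [List.getD_eq_getElem?_getD, List.getElem?_eq_getElem h2]

theorem restr_init (n : Nat) (r : List Int) (h : r.length ≤ n) :
    restr (List.replicate n true) r = r := by
  unfold restr
  rw [List.filter_congr (fun x hx =>
    show rmask (List.replicate n true) x = (fun _ => true) x by
      simp at hx
      simp [rmask, List.getD_eq_getElem?_getD, show x < n by omega])]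
  rw [List.filter_true]
  exact map_getD_range r 0

theorem abs_init (R : List (List Int)) (HP : ∀ r ∈ R, r.length ≤ R.length) :
    absM R (List.replicate R.length true) = R := by
  unfold absM
  rw [List.filter_congr (fun x hx =>
    show (List.replicate R.length true).getD x false = (fun _ => true) x by
      simp at hx
      simp [List.getD_eq_getElem?_getD, hx])]
  rw [List.filter_true]
  rw [List.map_congr_left (fun x hx => by
    simp at hx
    exact restr_init R.length (R.getD x []) (HP _ (getD_mem_of_lt R x [] hx)))]
  exact map_getD_range R []

theorem inv_init (R : List (List Int)) (HP : ∀ r ∈ R, r.length ≤ R.length) :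
    InvR R (List.replicate R.length true) (R.map cntB) := by
  refine ⟨by simp, by simp, ?_⟩
  intro k hk _
  rw [restr_init R.length (R.getD k []) (HP _ (getD_mem_of_lt R k [] hk))]
  rw [List.getD_eq_getElem?_getD, List.getElem?_map, List.getElem?_eq_getElem hk]
  show cntB R[k] = cntA (R.getD k [])
  rw [List.getD_eq_getElem?_getD, List.getElem?_eq_getElem hk]
  exact cntB_eq _

-- B's final zip-built result is the abstraction of its final mask
theorem alt_eq_absM (R : List (List Int)) (HP : ∀ r ∈ R, r.length = R.length) :
    delect_alt R = absM R (loopB R (R.length + 1) (List.replicate R.length true) (R.map cntB)) := by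
  unfold delect_alt
  simp only []
  set af := loopB R (R.length + 1) (List.replicate R.length true) (R.map cntB) with haf
  have hafl : af.length = R.length := by rw [haf, loopB_length]; simp
  have houter : ((af.zip R).filter (fun p => p.1)).map (fun p =>
      ((af.zip p.2).filter (fun q => q.1)).map (fun q => q.2))
      = (((af.zip R).filter (fun p => p.1)).map (fun p => p.2)).map (fun r =>
          ((af.zip r).filter (fun q => q.1)).map (fun q => q.2)) := by
    rw [List.map_map]
    rfl
  rw [houter, zsel_eq ([] : List Int) af R hafl, List.map_map]
  unfold absM
  apply List.map_congr_left
  intro k hk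
  simp only [List.mem_filter, List.mem_range] at hk
  show ((af.zip (R.getD k [])).filter (fun q => q.1)).map (fun q => q.2)
      = restr af (R.getD k [])
  rw [zsel_eq (0 : Int) af (R.getD k [])
    (by rw [hafl, HP _ (getD_mem_of_lt R k [] hk.1)])]
  rfl

-- ===== VERDICT (by name: the statement is the Claim_ definition above) =====
theorem delect_spec : Claim_equal_delect := by
  unfold Claim_equal_delect
  intro roads _ hPre
  have HPle : ∀ r ∈ roads, roads.length ≤ r.length := fun r hr => le_of_eq (hPre r hr).symm
  have HPge : ∀ r ∈ roads, r.length ≤ roads.length := fun r hr => le_of_eq (hPre r hr)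
  unfold Spec_delect delect
  have h0 : loopA (roads.length + 1) roads
      = loopA (roads.length + 1) (absM roads (List.replicate roads.length true)) := by
    rw [abs_init roads HPge]
  rw [h0, loop_sim roads HPle (roads.length + 1)
    _ _ (inv_init roads HPge) (by
      have : cb (List.replicate roads.length true) roads.length ≤ roads.length := by
        unfold cb
        have := List.length_filter_le (fun p => (List.replicate roads.length true).getD p false)
          (List.range roads.length)
        simpa using this
      omega)]
  rw [alt_eq_absM roads hPre]
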